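-- pv_equiv track=rewrite | github.com/michaelayoade/dotmac_framework | tools/relocate_b008_blocks.py | line_starts
-- ===== SOURCE A (Python) =====
-- def line_starts(src: str) -> list[int]:
--     starts = [0]
--     idx = 0
--     while True:
--         i = src.find("\n", idx)
--         if i == -1:
--             break
--         starts.append(i + 1)
--         idx = i + 1
--     return starts
-- ===== SOURCE B (Python) =====
-- def line_starts(src: str) -> list[int]:
--     starts = [0]
--     pos = 0
--     for line in src.splitlines(keepends=True):
--         pos += len(line)
--         if line.endswith("\n"):
--             starts.append(pos)
--     return starts
-- ===== Notes on version B (the rewrite author's own statement) =====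
-- stated objective: alternative
-- what changed: B splits the source into lines with splitlines(keepends=True) and prefix-sums the line lengths, appending the running offset after every newline-terminated line, instead of A's stateful loop of repeated str.find calls that records each match position.
import Mathlib
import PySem

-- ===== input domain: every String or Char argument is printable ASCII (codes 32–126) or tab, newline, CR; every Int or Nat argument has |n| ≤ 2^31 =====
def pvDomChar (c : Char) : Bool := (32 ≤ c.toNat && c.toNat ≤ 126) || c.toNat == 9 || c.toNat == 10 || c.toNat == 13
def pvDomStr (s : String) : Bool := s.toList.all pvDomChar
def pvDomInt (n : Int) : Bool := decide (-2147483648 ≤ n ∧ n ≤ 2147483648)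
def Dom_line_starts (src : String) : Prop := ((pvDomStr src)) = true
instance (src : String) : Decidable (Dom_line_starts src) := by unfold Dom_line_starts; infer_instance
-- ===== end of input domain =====

-- B replaces A's repeated str.find('\n', idx) loop by splitlines(keepends=True) plus a
-- prefix sum of line lengths (objective: alternative decomposition, same cost).

-- ===== PORT A =====
-- A's while-True loop: repeatedly find '\n' from idx; fuel = src.length + 1 bounds the
-- iteration count (one newline consumed per iteration), it never cuts the loop short.
def lineStartsLoopA (src : String) (fuel : Nat) (idx : Int) (starts : List Int) : List Int :=
  match fuel with
  | 0 => starts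
  | fuel + 1 =>
    let i := PySem.Str.findFrom src "\n" idx none
    if i = -1 then starts
    else lineStartsLoopA src fuel (i + 1) (starts ++ [i + 1])

def line_starts (src : String) : List Int :=
  lineStartsLoopA src (src.length + 1) 0 [0]

-- ===== PORT B =====
-- src.splitlines(keepends=True), hand-ported (PySem.Str.splitlines drops the ends):
-- exact on Dom_line_starts, whose only line-break characters are '\n', '\r' and "\r\n".
def splitKeep (acc : List Char) : List Char → List (List Char)
  | [] => if acc = [] then [] else [acc.reverse]
  | '\n' :: cs => (acc.reverse ++ ['\n']) :: splitKeep [] cs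
  | '\r' :: '\n' :: cs => (acc.reverse ++ ['\r', '\n']) :: splitKeep [] cs
  | '\r' :: cs => (acc.reverse ++ ['\r']) :: splitKeep [] cs
  | c :: cs => splitKeep (c :: acc) cs

def line_starts_alt (src : String) : List Int :=
  let r := (splitKeep [] src.toList).foldl
    (fun (p : Int × List Int) line =>
      let pos := p.1 + line.length
      (pos, if PySem.Chars.endswith line ['\n'] then p.2 ++ [pos] else p.2))
    (0, [0])
  r.2

-- ===== PRECONDITION & SPEC =====
def Spec_line_starts (src : String) (out : List Int) : Prop := out = line_starts_alt src
instance (src : String) (out : List Int) : Decidable (Spec_line_starts src out) := by unfold Spec_line_starts; infer_instance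

-- ===== CLAIM (what is proved, stated in full; the proofs are below) =====
def Claim_equal_line_starts : Prop := ∀ (src : String), Dom_line_starts src → Spec_line_starts src (line_starts src)



-- ===== LEMMAS AND PROOFS =====

-- canonical value: (index+1) of every '\n' in cs, indices counted from offset k
def canon : List Char → Int → List Int
  | [], _ => []
  | '\n' :: cs, k => (k + 1) :: canon cs (k + 1)
  | _ :: cs, k => canon cs (k + 1)

lemma canon_cons_ne (c : Char) (cs : List Char) (k : Int) (h : c ≠ '\n') :
    canon (c :: cs) k = canon cs (k + 1) := by
  rw [canon.eq_def]
  split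
  · simp_all
  · simp_all
  · rename_i heq; cases heq; rfl

lemma canon_congr (cs : List Char) (k k' : Int) (h : k = k') : canon cs k = canon cs k' := by
  rw [h]

lemma canon_length_indep (cs : List Char) (k k' : Int) :
    (canon cs k).length = (canon cs k').length := by
  induction cs generalizing k k' with
  | nil => rfl
  | cons c cs ih =>
    by_cases h : c = '\n'
    · subst h; simp [canon, ih (k + 1) (k' + 1)]
    · rw [canon_cons_ne c cs k h, canon_cons_ne c cs k' h]; exact ih _ _

lemma canon_len_le (cs : List Char) (k : Int) : (canon cs k).length ≤ cs.length := by
  induction cs generalizing k with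
  | nil => simp [canon]
  | cons c cs ih =>
    by_cases h : c = '\n'
    · subst h; simpa [canon] using ih (k + 1)
    · rw [canon_cons_ne c cs k h]; exact (ih (k + 1)).trans (by simp)

lemma canon_of_not_mem (cs : List Char) (k : Int) (h : '\n' ∉ cs) : canon cs k = [] := by
  induction cs generalizing k with
  | nil => rfl
  | cons c cs ih =>
    have hc : c ≠ '\n' := fun e => h (e ▸ List.mem_cons_self)
    rw [canon_cons_ne c cs k hc]
    exact ih (k + 1) (fun m => h (List.mem_cons_of_mem c m))

lemma canon_split (j : Nat) (cs : List Char) (k : Int)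
    (hj : cs[j]? = some '\n') (hmin : ∀ i < j, cs[i]? ≠ some '\n') :
    canon cs k = (k + j + 1) :: canon (cs.drop (j + 1)) (k + j + 1) := by
  induction j generalizing cs k with
  | zero =>
    cases cs with
    | nil => simp at hj
    | cons c cs => simp at hj; subst hj; simp [canon]
  | succ j ih =>
    cases cs with
    | nil => simp at hj
    | cons c cs =>
      have hc : c ≠ '\n' := by
        have := hmin 0 (by omega); simpa using this
      rw [canon_cons_ne c cs k hc]
      have h2 := ih cs (k + 1) (by simpa using hj)
        (fun i hi => by have := hmin (i + 1) (by omega); simpa using this)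
      have e1 : k + 1 + (j : Int) + 1 = k + ((j : Nat) + 1 : Nat) + 1 := by push_cast; ring
      have e2 : cs.drop (j + 1) = (c :: cs).drop (j + 1 + 1) := by simp
      rw [h2, e1, e2]

-- singleton-pattern facts about PySem.Chars.find
lemma singleton_infix_iff (a : Char) (l : List Char) : [a] <:+: l ↔ a ∈ l := by
  constructor
  · intro h; exact h.subset (by simp)
  · intro h; obtain ⟨s, t, rfl⟩ := List.append_of_mem h; exact ⟨s, t, by simp⟩

lemma find_nl_eq_neg_one_iff (cs : List Char) :
    PySem.Chars.find cs ['\n'] = -1 ↔ '\n' ∉ cs := by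
  rw [PySem.Chars.find_eq_neg_one_iff, singleton_infix_iff]

lemma singleton_prefix_iff (a : Char) (l : List Char) : [a] <+: l ↔ l.head? = some a := by
  constructor
  · rintro ⟨t, rfl⟩; rfl
  · intro h; cases l with
    | nil => simp at h
    | cons c cs => simp at h; subst h; exact ⟨cs, rfl⟩

lemma find_nl_spec (cs : List Char) (h : PySem.Chars.find cs ['\n'] ≠ -1) :
    cs[(PySem.Chars.find cs ['\n']).toNat]? = some '\n' ∧
    ∀ i < (PySem.Chars.find cs ['\n']).toNat, cs[i]? ≠ some '\n' := by
  have h0 : 0 ≤ PySem.Chars.find cs ['\n'] := by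
    have := PySem.Chars.neg_one_le_find cs ['\n']; omega
  obtain ⟨h1, h2⟩ := PySem.Chars.find_spec h0
  refine ⟨?_, fun i hi hcontra => h2 i hi ?_⟩
  · rw [singleton_prefix_iff] at h1; rwa [List.head?_drop] at h1
  · rw [singleton_prefix_iff, List.head?_drop]; exact hcontra

-- ===== A-side: the find loop computes canon =====
lemma loopA_eq (src : String) (fuel k : Nat) (starts : List Int)
    (hk : k ≤ src.toList.length)
    (hfuel : (canon (src.toList.drop k) 0).length < fuel) :
    lineStartsLoopA src fuel (k : Int) starts
      = starts ++ canon (src.toList.drop k) (k : Int) := by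
  induction fuel generalizing k starts with
  | zero => omega
  | succ fuel ih =>
    rw [lineStartsLoopA]
    simp only [PySem.Str.findFrom_eq]
    have hsub : ("\n" : String).toList = ['\n'] := rfl
    rw [hsub, PySem.Chars.findFrom_natCast src.toList ['\n'] k hk]
    by_cases hfind : PySem.Chars.find (src.toList.drop k) ['\n'] = -1
    · rw [if_pos hfind]
      rw [canon_of_not_mem _ _ ((find_nl_eq_neg_one_iff _).mp hfind)]
      simp
    · rw [if_neg hfind]
      have h0 : 0 ≤ PySem.Chars.find (src.toList.drop k) ['\n'] := by
        have := PySem.Chars.neg_one_le_find (src.toList.drop k) ['\n']; omega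
      set f := PySem.Chars.find (src.toList.drop k) ['\n'] with hf
      set j : Nat := f.toNat with hjdef
      have hfj : f = (j : Int) := by omega
      have hne : (k : Int) + f ≠ -1 := by omega
      rw [if_neg hne]
      obtain ⟨hjget, hjmin⟩ := find_nl_spec (src.toList.drop k) hfind
      have hjlt : j < (src.toList.drop k).length := (List.getElem?_eq_some_iff.mp hjget).1
      have hk' : k + j + 1 ≤ src.toList.length := by
        rw [List.length_drop] at hjlt; omega
      have hsplit := canon_split j (src.toList.drop k) (k : Int) hjget hjmin
      have hdd : (src.toList.drop k).drop (j + 1) = src.toList.drop (k + j + 1) := by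
        rw [List.drop_drop]
        rfl
      have hcast : (k : Int) + f + 1 = ((k + j + 1 : Nat) : Int) := by
        push_cast; omega
      rw [hcast]
      have hfuel' : (canon (src.toList.drop (k + j + 1)) 0).length < fuel := by
        have hsplit' := hsplit
        rw [hdd] at hsplit'
        have hlen : (canon (src.toList.drop k) 0).length
            = (canon (src.toList.drop (k + j + 1)) 0).length + 1 := by
          rw [canon_length_indep _ 0 (k : Int), hsplit']
          simp [canon_length_indep _ ((k : Int) + (j : Int) + 1) 0]
        omega
      rw [ih (k + j + 1) (starts ++ [((k + j + 1 : Nat) : Int)]) hk' hfuel']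
      rw [hsplit, hdd]
      have e3 : (k : Int) + (j : Int) + 1 = ((k + j + 1 : Nat) : Int) := by push_cast; ring
      rw [e3]
      simp

lemma line_starts_eq_canon (src : String) :
    line_starts src = 0 :: canon src.toList 0 := by
  rw [line_starts]
  have h := loopA_eq src (src.length + 1) 0 [0] (by simp)
    (by simpa using Nat.lt_succ_of_le (by simpa using canon_len_le src.toList 0))
  simp only [Nat.cast_zero, List.drop_zero] at h
  rw [h]
  simp

-- ===== B-side: splitlines + prefix sum computes canon =====
lemma endswith_append_nl (l : List Char) :
    PySem.Chars.endswith (l ++ ['\n']) ['\n'] = true := by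
  rw [PySem.Chars.endswith_iff]; exact List.suffix_append l ['\n']

lemma endswith_concat_ne (l : List Char) (c : Char) (h : c ≠ '\n') :
    PySem.Chars.endswith (l ++ [c]) ['\n'] = false := by
  rw [Bool.eq_false_iff]
  intro hcontra
  rw [PySem.Chars.endswith_iff] at hcontra
  obtain ⟨t, ht⟩ := hcontra
  have := congrArg List.getLast? ht
  simp at this
  exact h this.symm

lemma endswith_no_nl (l : List Char) (h : '\n' ∉ l) :
    PySem.Chars.endswith l ['\n'] = false := by
  rw [Bool.eq_false_iff]
  intro hcontra
  rw [PySem.Chars.endswith_iff] at hcontra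
  exact h (hcontra.subset (by simp))

lemma splitKeep_fold (acc cs : List Char) :
    '\n' ∉ acc → '\r' ∉ acc → ∀ (pos : Int) (starts : List Int),
    (splitKeep acc cs).foldl
      (fun (p : Int × List Int) line =>
        let pos := p.1 + line.length
        (pos, if PySem.Chars.endswith line ['\n'] then p.2 ++ [pos] else p.2))
      (pos, starts)
    = (pos + acc.length + cs.length, starts ++ canon cs (pos + acc.length)) := by
  induction acc, cs using splitKeep.induct with
  | case1 =>
    intro _ _ pos starts
    simp [splitKeep, canon]
  | case2 acc hacc =>
    intro hn _ pos starts
    rw [splitKeep, if_neg hacc]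
    simp only [List.foldl_cons, List.foldl_nil]
    rw [endswith_no_nl acc.reverse (by simpa using hn)]
    simp [canon]
  | case3 acc cs ih =>
    intro hn hr pos starts
    rw [splitKeep]
    simp only [List.foldl_cons, endswith_append_nl, if_true]
    rw [ih (by simp) (by simp)]
    rw [canon]
    refine Prod.ext ?_ ?_ <;>
      simp only [List.length_append, List.length_reverse, List.length_cons, List.length_nil,
        List.append_assoc, List.singleton_append, List.cons_append, List.nil_append,
        List.append_right_inj, List.cons.injEq, Nat.cast_add, Nat.cast_ofNat, Nat.cast_one,
        Nat.cast_zero] <;>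
      first
        | omega
        | (refine ⟨by omega, canon_congr _ _ _ (by omega)⟩)
        | exact canon_congr _ _ _ (by omega)
  | case4 acc cs ih =>
    intro hn hr pos starts
    rw [splitKeep]
    have ha : acc.reverse ++ ['\r', '\n'] = (acc.reverse ++ ['\r']) ++ ['\n'] := by simp
    simp only [List.foldl_cons]
    rw [ha, endswith_append_nl]
    simp only [if_true]
    rw [ih (by simp) (by simp)]
    rw [canon_cons_ne '\r' _ _ (by decide), canon]
    refine Prod.ext ?_ ?_ <;>
      simp only [List.length_append, List.length_reverse, List.length_cons, List.length_nil,
        List.append_assoc, List.singleton_append, List.cons_append, List.nil_append,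
        List.append_right_inj, List.cons.injEq, Nat.cast_add, Nat.cast_ofNat, Nat.cast_one,
        Nat.cast_zero] <;>
      first
        | omega
        | (refine ⟨by omega, canon_congr _ _ _ (by omega)⟩)
        | exact canon_congr _ _ _ (by omega)
  | case5 acc cs hne ih =>
    intro hn hr pos starts
    have hstep : splitKeep acc ('\r' :: cs) = (acc.reverse ++ ['\r']) :: splitKeep [] cs := by
      rw [splitKeep.eq_def]
      cases cs with
      | nil => rfl
      | cons d cs' =>
        by_cases hd : d = '\n'
        · exact (hne cs' (by rw [hd])).elim
        · simp only []
    rw [hstep]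
    simp only [List.foldl_cons]
    rw [endswith_concat_ne acc.reverse '\r' (by decide)]
    simp only [if_false, Bool.false_eq_true]
    rw [ih (by simp) (by simp)]
    rw [canon_cons_ne '\r' _ _ (by decide)]
    refine Prod.ext ?_ ?_ <;>
      simp only [List.length_append, List.length_reverse, List.length_cons, List.length_nil,
        List.append_assoc, List.singleton_append, List.cons_append, List.nil_append,
        List.append_right_inj, List.cons.injEq, Nat.cast_add, Nat.cast_ofNat, Nat.cast_one,
        Nat.cast_zero] <;>
      first
        | omega
        | (refine ⟨by omega, canon_congr _ _ _ (by omega)⟩)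
        | exact canon_congr _ _ _ (by omega)
  | case6 acc c cs hc1 hc2 hc3 ih =>
    intro hn hr pos starts
    have hnc : c ≠ '\n' := fun e => hc1 e
    have hrc : c ≠ '\r' := fun e => hc3 e
    have hstep : splitKeep acc (c :: cs) = splitKeep (c :: acc) cs := by
      rw [splitKeep.eq_def]
      simp only []
    rw [hstep]
    rw [ih
      (by intro hmem; rcases List.mem_cons.mp hmem with h | h
          · exact hnc h.symm
          · exact hn h)
      (by intro hmem; rcases List.mem_cons.mp hmem with h | h
          · exact hrc h.symm
          · exact hr h)]
    rw [canon_cons_ne c _ _ hnc]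
    refine Prod.ext ?_ ?_ <;>
      simp only [List.length_append, List.length_reverse, List.length_cons, List.length_nil,
        List.append_assoc, List.singleton_append, List.cons_append, List.nil_append,
        List.append_right_inj, List.cons.injEq, Nat.cast_add, Nat.cast_ofNat, Nat.cast_one,
        Nat.cast_zero] <;>
      first
        | omega
        | (refine ⟨by omega, canon_congr _ _ _ (by omega)⟩)
        | exact canon_congr _ _ _ (by omega)
-- ===== VERDICT (by name: the statement is the Claim_ definition above) =====
theorem line_starts_spec : Claim_equal_line_starts := by
  intro src _
  unfold Spec_line_starts line_starts_alt
  rw [line_starts_eq_canon]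
  rw [splitKeep_fold [] src.toList (by simp) (by simp) 0 [0]]
  simp
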